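-- pv_equiv track=rewrite | github.com/yoonjae0402/mlb-ai-analytics | src/analysis/analyzer.py | _count_momentum_shifts
-- ===== SOURCE A (Python) =====
-- def _count_momentum_shifts(game_data: dict) -> int:
--     """Count significant momentum shifts."""
--     scoring_plays = game_data.get("scoring_plays", [])
--     if not scoring_plays:
--         return 0
--
--     momentum_shifts = 0
--     current_diff = 0
--     last_scoring_team_is_home = None
--
--     for play in scoring_plays:
--         runs = play.get("runs", 1)
--         is_home = play.get("is_home_team", False)
--
--         # Count as momentum shift when:
--         # 1. Lead changes hands
--         # 2. Big inning (3+ runs) changes the game dynamic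
--
--         prev_diff = current_diff
--         current_diff += runs if is_home else -runs
--
--         # Lead change
--         if (prev_diff > 0 and current_diff < 0) or (prev_diff < 0 and current_diff > 0):
--             momentum_shifts += 1
--
--         # Tie broken
--         elif prev_diff == 0 and current_diff != 0:
--             momentum_shifts += 1
--
--         # Big scoring play (3+ runs)
--         elif runs >= 3:
--             momentum_shifts += 1
--
--         # Answer-back momentum (opponent scores immediately after)
--         elif last_scoring_team_is_home is not None and last_scoring_team_is_home != is_home:
--             # Check if this is a quick response (within same inning or next)
--             # For now, just count scoring by different teams in succession as potential shift
--             pass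
--
--         last_scoring_team_is_home = is_home
--
--     return momentum_shifts
-- ===== SOURCE B (Python) =====
-- def _count_momentum_shifts(game_data: dict) -> int:
--     """Count significant momentum shifts (prefix-sum-table decomposition)."""
--     plays = game_data.get("scoring_plays", [])
--     if not plays:
--         return 0
--
--     # Phase 1: tabulate signed deltas and raw run counts.
--     deltas = []
--     runs_list = []
--     for p in plays:
--         runs = p.get("runs", 1)
--         is_home = p.get("is_home_team", False)
--         deltas.append(runs if is_home else -runs)
--         runs_list.append(runs)
--
--     # Phase 2: running score differentials (prefix sums with initial 0).
--     totals = [0]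
--     t = 0
--     for d in deltas:
--         t += d
--         totals.append(t)
--
--     # Phase 3: count shifts from consecutive (prev, cur) pairs.
--     return sum(
--         1
--         for (prev, cur), runs in zip(zip(totals, totals[1:]), runs_list)
--         if (prev > 0 and cur < 0) or (prev < 0 and cur > 0)
--         or (prev == 0 and cur != 0) or runs >= 3
--     )
-- ===== Notes on version B (the rewrite author's own statement) =====
-- stated objective: alternative
-- what changed: Replaces A's single stateful loop (running diff, shift counter and dead last-team state mutated together) by a three-phase table decomposition: tabulate signed deltas and raw runs, build the prefix-sum table of running differentials, then count shifts with one pure generator over adjacent (prev, cur, runs) triples.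
import Mathlib
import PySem

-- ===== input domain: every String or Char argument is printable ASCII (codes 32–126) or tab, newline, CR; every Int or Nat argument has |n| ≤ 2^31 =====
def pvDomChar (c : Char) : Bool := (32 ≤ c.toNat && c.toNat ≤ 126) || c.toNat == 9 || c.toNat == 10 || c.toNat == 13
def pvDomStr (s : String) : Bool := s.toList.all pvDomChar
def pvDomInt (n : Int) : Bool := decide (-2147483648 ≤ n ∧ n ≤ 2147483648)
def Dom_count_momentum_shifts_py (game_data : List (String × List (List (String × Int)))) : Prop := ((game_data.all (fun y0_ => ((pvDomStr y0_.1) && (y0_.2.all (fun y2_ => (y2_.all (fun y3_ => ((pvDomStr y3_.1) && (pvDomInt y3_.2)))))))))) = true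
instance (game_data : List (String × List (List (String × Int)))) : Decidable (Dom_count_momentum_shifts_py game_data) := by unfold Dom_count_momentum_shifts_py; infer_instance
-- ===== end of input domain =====

-- B replaces A's single stateful loop by a three-phase table decomposition (deltas/runs tables,
-- prefix-sum table of running differentials, pure counting pass); alternative, not faster.


-- ===== PORT A =====
-- one loop iteration of A: state = (momentum_shifts, current_diff, last_scoring_team_is_home)
def pvStepA (s : Int × Int × Option Bool) (play : List (String × Int)) : Int × Int × Option Bool :=
  let runs := PySem.Dict.getD (PySem.Dict.mk play) "runs" 1
  let is_home : Bool := decide ((PySem.Dict.getD (PySem.Dict.mk play) "is_home_team" 0) ≠ 0)  -- Python truthiness of the int value (default False)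
  let prev_diff := s.2.1
  let current_diff := prev_diff + (if is_home then runs else -runs)
  let momentum_shifts :=
    if (prev_diff > 0 ∧ current_diff < 0) ∨ (prev_diff < 0 ∧ current_diff > 0) then s.1 + 1
    else if prev_diff = 0 ∧ current_diff ≠ 0 then s.1 + 1
    else if runs ≥ 3 then s.1 + 1
    else if s.2.2 ≠ none ∧ s.2.2 ≠ some is_home then s.1  -- 'pass' branch
    else s.1
  (momentum_shifts, current_diff, some is_home)

def count_momentum_shifts_py (game_data : List (String × List (List (String × Int)))) : Int :=
  let scoring_plays := PySem.Dict.getD (PySem.Dict.mk game_data) "scoring_plays" []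
  if scoring_plays = [] then 0
  else (scoring_plays.foldl pvStepA (0, 0, none)).1

-- ===== PORT B =====
-- phase 1: the delta table and the raw-runs table
def pvDeltasRuns : List (List (String × Int)) → List Int × List Int
  | [] => ([], [])
  | p :: rest =>
    let runs := PySem.Dict.getD (PySem.Dict.mk p) "runs" 1
    let is_home : Bool := decide ((PySem.Dict.getD (PySem.Dict.mk p) "is_home_team" 0) ≠ 0)
    let tail := pvDeltasRuns rest
    ((if is_home then runs else -runs) :: tail.1, runs :: tail.2)

-- phase 2: prefix sums after an initial running total t
def pvAccum (t : Int) : List Int → List Int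
  | [] => []
  | d :: ds => (t + d) :: pvAccum (t + d) ds

-- phase 3: the shift predicate and the counting pass over zipped triples
def pvShift (prev cur runs : Int) : Bool :=
  (prev > 0 && cur < 0) || (prev < 0 && cur > 0) || (prev == 0 && cur != 0) || runs ≥ 3

def pvCount : List ((Int × Int) × Int) → Int
  | [] => 0
  | ((prev, cur), runs) :: rest => (if pvShift prev cur runs then 1 else 0) + pvCount rest

def count_momentum_shifts_py_alt (game_data : List (String × List (List (String × Int)))) : Int :=
  let plays := PySem.Dict.getD (PySem.Dict.mk game_data) "scoring_plays" []
  if plays = [] then 0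
  else
    let tabs := pvDeltasRuns plays
    let totals := 0 :: pvAccum 0 tabs.1
    pvCount ((totals.zip (totals.drop 1)).zip tabs.2)

-- ===== PRECONDITION & SPEC =====
def Spec_count_momentum_shifts_py (game_data : List (String × List (List (String × Int)))) (out : Int) : Prop := out = count_momentum_shifts_py_alt game_data
instance (game_data : List (String × List (List (String × Int)))) (out : Int) : Decidable (Spec_count_momentum_shifts_py game_data out) := by unfold Spec_count_momentum_shifts_py; infer_instance

-- ===== CLAIM (what is proved, stated in full; the proofs are below) =====
def Claim_equal_count_momentum_shifts_py : Prop := ∀ (game_data : List (String × List (List (String × Int)))), Dom_count_momentum_shifts_py game_data → Spec_count_momentum_shifts_py game_data (count_momentum_shifts_py game_data)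

-- ===== LEMMAS AND PROOFS =====

-- reference count: shifts of a play list starting from running differential cd
def pvCnt (cd : Int) : List (List (String × Int)) → Int
  | [] => 0
  | p :: rest =>
    let runs := PySem.Dict.getD (PySem.Dict.mk p) "runs" 1
    let is_home : Bool := decide ((PySem.Dict.getD (PySem.Dict.mk p) "is_home_team" 0) ≠ 0)
    let cur := cd + (if is_home then runs else -runs)
    (if pvShift cd cur runs then 1 else 0) + pvCnt cur rest

theorem foldA_eq_cnt (plays : List (List (String × Int))) :
    ∀ (ms cd : Int) (last : Option Bool),
      (plays.foldl pvStepA (ms, cd, last)).1 = ms + pvCnt cd plays := by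
  induction plays with
  | nil => intro ms cd last; simp [pvCnt]
  | cons p rest ih =>
    intro ms cd last
    simp only [List.foldl, pvStepA, pvCnt, pvShift]
    rw [ih]
    generalize (PySem.Dict.mk p).getD "runs" 1 = r at *
    generalize pvCnt (cd + if (decide ((PySem.Dict.mk p).getD "is_home_team" 0 ≠ 0)) = true then r else -r) rest = k at *
    split_ifs <;> simp_all <;> omega

theorem count_eq_cnt (plays : List (List (String × Int))) : ∀ (t : Int),
    pvCount ((((t :: pvAccum t (pvDeltasRuns plays).1).zip
        ((t :: pvAccum t (pvDeltasRuns plays).1).drop 1)).zip (pvDeltasRuns plays).2))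
      = pvCnt t plays := by
  induction plays with
  | nil => intro t; simp [pvDeltasRuns, pvAccum, pvCount, pvCnt]
  | cons p rest ih =>
    intro t
    simp only [pvDeltasRuns, pvAccum, pvCnt, List.drop, List.zip, List.zipWith, pvCount]
    rw [← ih (t + _)]
    simp [List.zip]

-- ===== VERDICT (by name: the statement is the Claim_ definition above) =====
theorem count_momentum_shifts_py_spec : Claim_equal_count_momentum_shifts_py := by
  intro game_data _
  unfold Spec_count_momentum_shifts_py count_momentum_shifts_py count_momentum_shifts_py_alt
  by_cases h : PySem.Dict.getD (PySem.Dict.mk game_data) "scoring_plays" [] = []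
  · simp [h]
  · simp only [h, if_false]
    rw [foldA_eq_cnt, count_eq_cnt]
    simp
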